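-- pv_equiv track=rewrite | github.com/Hemasuvarna51/LearrningAgent | src/learning_agent.py | _pipeline_from_notes
-- ===== SOURCE A (Python) =====
-- def _dedupe_keep_order(lines: list[str]) -> list[str]:
--     seen = set()
--     out = []
--     for x in lines:
--         k = (x or "").strip().lower()
--         if not k or k in seen:
--             continue
--         seen.add(k)
--         out.append(x.strip())
--     return out
--
-- def _pipeline_from_notes(lines: list[str]) -> list[str]:
--     kws = (
--         "data collection", "data preprocessing", "preprocessing", "cleaning", "normalization",
--         "feature engineering", "features", "model selection", "training", "validation",
--         "evaluation", "deployment", "monitoring", "retraining", "concept drift"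
--     )
--     hits = []
--     for s in lines:
--         low = s.lower()
--         if any(k in low for k in kws):
--             hits.append(s)
--     hits = _dedupe_keep_order(hits)
--     return hits[:7]
-- ===== SOURCE B (Python) =====
-- def _pipeline_from_notes(lines: list[str]) -> list[str]:
--     kws = (
--         "data collection", "data preprocessing", "preprocessing", "cleaning", "normalization",
--         "feature engineering", "features", "model selection", "training", "validation",
--         "evaluation", "deployment", "monitoring", "retraining", "concept drift"
--     )
--     seen = set()
--     out = []
--     for s in lines:
--         if len(out) == 7:
--             break
--         low = s.lower()
--         if not any(k in low for k in kws):
--             continue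
--         key = (s or "").strip().lower()
--         if not key or key in seen:
--             continue
--         seen.add(key)
--         out.append(s.strip())
--     return out
-- ===== Notes on version B (the rewrite author's own statement) =====
-- stated objective: alternative
-- what changed: B fuses the keyword filter, order-preserving dedupe and the [:7] slice into one pass with a seen-set and an early break at 7 results, instead of A's two passes plus a slice.
import Mathlib
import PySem

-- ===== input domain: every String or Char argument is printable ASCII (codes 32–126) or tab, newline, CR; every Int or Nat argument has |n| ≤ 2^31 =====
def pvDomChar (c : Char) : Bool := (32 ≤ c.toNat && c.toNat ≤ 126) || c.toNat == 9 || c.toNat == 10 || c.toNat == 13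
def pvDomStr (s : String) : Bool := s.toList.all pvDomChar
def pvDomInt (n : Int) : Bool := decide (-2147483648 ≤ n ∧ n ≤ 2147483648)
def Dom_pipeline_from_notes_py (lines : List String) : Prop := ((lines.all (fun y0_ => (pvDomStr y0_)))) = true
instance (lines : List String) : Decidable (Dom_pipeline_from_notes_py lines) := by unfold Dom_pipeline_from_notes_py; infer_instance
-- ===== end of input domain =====

-- B fuses A's keyword filter, order-preserving dedupe and [:7] slice into a single pass
-- with an early break at 7 results; same return value, alternative decomposition.

-- ===== PORT A =====
def pvKws : List String :=
  ["data collection", "data preprocessing", "preprocessing", "cleaning", "normalization",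
   "feature engineering", "features", "model selection", "training", "validation",
   "evaluation", "deployment", "monitoring", "retraining", "concept drift"]

-- helper _dedupe_keep_order: loop with seen-set and out-accumulator
def pvDedupeGo (seen : PySem.Set String) (out : List String) : List String → List String
  | [] => out
  | x :: rest =>
    let k := PySem.Str.lower (PySem.Str.strip (if x == "" then "" else x))
    if k == "" || PySem.Set.contains seen k then pvDedupeGo seen out rest
    else pvDedupeGo (PySem.Set.add seen k) (out ++ [PySem.Str.strip x]) rest

def pipeline_from_notes_py (lines : List String) : List String :=
  let hits := lines.foldl (fun hits s =>
    let low := PySem.Str.lower s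
    if pvKws.any (fun k => PySem.Str.isIn k low) then hits ++ [s] else hits) []
  let hits := pvDedupeGo PySem.Set.empty [] hits
  PySem.List.slice hits none (some 7)

-- ===== PORT B =====
-- single fused loop: filter, dedupe and break at 7 in one pass (from Source B)
def pvGoB (seen : PySem.Set String) (out : List String) : List String → List String
  | [] => out
  | s :: rest =>
    if out.length == 7 then out
    else
      let low := PySem.Str.lower s
      if !(pvKws.any (fun k => PySem.Str.isIn k low)) then pvGoB seen out rest
      else
        let key := PySem.Str.lower (PySem.Str.strip (if s == "" then "" else s))
        if key == "" || PySem.Set.contains seen key then pvGoB seen out rest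
        else pvGoB (PySem.Set.add seen key) (out ++ [PySem.Str.strip s]) rest

def pipeline_from_notes_py_alt (lines : List String) : List String :=
  pvGoB PySem.Set.empty [] lines

-- ===== PRECONDITION & SPEC =====
def Spec_pipeline_from_notes_py (lines : List String) (out : List String) : Prop := out = pipeline_from_notes_py_alt lines
instance (lines : List String) (out : List String) : Decidable (Spec_pipeline_from_notes_py lines out) := by unfold Spec_pipeline_from_notes_py; infer_instance

-- ===== CLAIM (what is proved, stated in full; the proofs are below) =====
def Claim_equal_pipeline_from_notes_py : Prop := ∀ (lines : List String), Dom_pipeline_from_notes_py lines → Spec_pipeline_from_notes_py lines (pipeline_from_notes_py lines)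

-- ===== LEMMAS AND PROOFS =====

-- (x or "") on a string is x itself
theorem pvOrEmpty (x : String) : (if x == "" then "" else x) = x := by
  split <;> simp_all

-- dedupe accumulator law
theorem pvDedupeGo_acc (xs : List String) : ∀ (seen : PySem.Set String) (out : List String),
    pvDedupeGo seen out xs = out ++ pvDedupeGo seen [] xs := by
  induction xs with
  | nil => intro seen out; simp [pvDedupeGo]
  | cons x rest ih =>
    intro seen out
    simp only [pvDedupeGo, pvOrEmpty]
    split
    · exact ih seen out
    · rw [ih _ (out ++ [PySem.Str.strip x]), ih _ ([] ++ [PySem.Str.strip x])]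
      simp

-- main fusion invariant: B's loop equals "take the remaining budget of A's dedupe of the filtered rest"
theorem pvGoB_eq (xs : List String) : ∀ (seen : PySem.Set String) (out : List String),
    out.length ≤ 7 →
    pvGoB seen out xs =
      out ++ (pvDedupeGo seen []
        (xs.filter (fun s => pvKws.any (fun k => PySem.Str.isIn k (PySem.Str.lower s))))).take (7 - out.length) := by
  induction xs with
  | nil => intro seen out _; simp [pvGoB, pvDedupeGo]
  | cons s rest ih =>
    intro seen out hle
    simp only [pvGoB, List.filter_cons, pvOrEmpty]
    by_cases h7 : out.length = 7
    · simp [h7]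
    · have hlt : out.length < 7 := lt_of_le_of_ne hle h7
      simp only [show (out.length == 7) = false by simp [h7]]
      by_cases hp : (pvKws.any (fun k => PySem.Str.isIn k (PySem.Str.lower s))) = true
      · simp only [hp, Bool.not_true, Bool.false_eq_true, if_false, if_true]
        simp only [pvDedupeGo, pvOrEmpty]
        by_cases hk : (PySem.Str.lower (PySem.Str.strip s) == ""
            || PySem.Set.contains seen (PySem.Str.lower (PySem.Str.strip s))) = true
        · simp only [hk, if_true]
          exact ih seen out hle
        · simp only [hk, Bool.false_eq_true, if_false]
          rw [ih _ (out ++ [PySem.Str.strip s]) (by simp; omega)]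
          rw [show 7 - out.length = (6 - out.length) + 1 from by omega,
            pvDedupeGo_acc _ _ ([] ++ [PySem.Str.strip s])]
          simp only [List.nil_append, List.singleton_append]
          rw [List.take_succ_cons]
          simp only [List.append_assoc, List.singleton_append, List.length_append,
            List.length_cons, List.length_nil]
          congr 3
          omega
      · rw [show (pvKws.any fun k => PySem.Str.isIn k (PySem.Str.lower s)) = false from by
          simpa using hp]
        simp only [Bool.not_false, if_true, Bool.false_eq_true, if_false]
        exact ih seen out hle

-- ===== VERDICT (by name: the statement is the Claim_ definition above) =====
theorem pipeline_from_notes_py_spec : Claim_equal_pipeline_from_notes_py := by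
  intro lines _
  unfold Spec_pipeline_from_notes_py pipeline_from_notes_py pipeline_from_notes_py_alt
  rw [pvGoB_eq lines PySem.Set.empty [] (by simp)]
  rw [show (lines.foldl (fun hits s =>
        let low := PySem.Str.lower s
        if pvKws.any (fun k => PySem.Str.isIn k low) then hits ++ [s] else hits) [])
      = lines.filter (fun s => pvKws.any (fun k => PySem.Str.isIn k (PySem.Str.lower s))) from by
    rw [PySem.List.foldl_append_if]; simp]
  simp [PySem.List.slice]
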